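-- pv_equiv track=rewrite | github.com/jakegussler/pipeline-practice | src/data_transformations.py | generate_sql_replace_query
-- ===== SOURCE A (Python) =====
-- def generate_sql_replace_query(table_name,column_name,characters_to_remove, replacement_characters):
--     """
--     Generates an SQL query to remove specific characters or strings from a column in a table.
--
--     :param table_name: Name of the table.
--     :param column_name: Name of the column from which characters/strings are to be removed.
--     :param characters_to_remove: List of characters or strings to remove.
--     :param replacement_characters: List or value to replace removed characters with
--     :return: SQL query string.
--     """
--     #Set up components for starting query
--     base_query = f"UPDATE {table_name} AS t SET {column_name} = "
--     replace_query = f"{column_name}"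
--
--
--     #Iterate through characters dynamically generating a SQL replace query
--     for char in characters_to_remove:
--          escaped_char = char.replace("'", "''")
--          replace_query = f"REPLACE({replace_query},'{escaped_char}','{replacement_characters}')"
--
--     #Generate and return final query
--     final_query = base_query + replace_query + ";"
--     return final_query
-- ===== SOURCE B (Python) =====
-- def generate_sql_replace_query(table_name, column_name, characters_to_remove, replacement_characters):
--     base_query = f"UPDATE {table_name} AS t SET {column_name} = "
--     opens = "REPLACE(" * len(characters_to_remove)
--     tails = "".join(
--         ",'" + char.replace("'", "''") + "','" + f"{replacement_characters}" + "')"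
--         for char in characters_to_remove
--     )
--     return base_query + opens + column_name + tails + ";"
-- ===== Notes on version B (the rewrite author's own statement) =====
-- stated objective: faster
-- what changed: Replaces the iterative string re-wrapping accumulator (which re-copies the whole growing query each step, quadratic in output size) with a flat one-pass construction: 'REPLACE(' * n, then the column name, then the joined per-character closing tails.
import Mathlib
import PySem

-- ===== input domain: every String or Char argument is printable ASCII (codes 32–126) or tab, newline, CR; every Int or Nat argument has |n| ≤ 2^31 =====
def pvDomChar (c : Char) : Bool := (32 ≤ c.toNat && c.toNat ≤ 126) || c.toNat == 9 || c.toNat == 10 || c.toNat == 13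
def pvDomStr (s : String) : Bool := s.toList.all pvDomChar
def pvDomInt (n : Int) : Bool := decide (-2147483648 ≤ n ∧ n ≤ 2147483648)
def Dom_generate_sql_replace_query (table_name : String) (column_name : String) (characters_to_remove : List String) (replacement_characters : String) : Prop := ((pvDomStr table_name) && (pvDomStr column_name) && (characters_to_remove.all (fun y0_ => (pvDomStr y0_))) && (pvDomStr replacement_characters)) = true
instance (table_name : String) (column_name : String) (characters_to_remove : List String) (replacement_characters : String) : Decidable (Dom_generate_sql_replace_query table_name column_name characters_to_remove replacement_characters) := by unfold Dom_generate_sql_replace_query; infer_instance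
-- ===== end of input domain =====

-- B builds the query flat (opens-repetition + column + joined tails) instead of A's iterative re-wrapping accumulator; same output.


-- ===== PORT A =====
def generate_sql_replace_query (table_name : String) (column_name : String) (characters_to_remove : List String) (replacement_characters : String) : String :=
  let base_query := "UPDATE " ++ table_name ++ " AS t SET " ++ column_name ++ " = "
  let replace_query := characters_to_remove.foldl
    (fun replace_query char =>
      let escaped_char := PySem.Str.replace char "'" "''"
      "REPLACE(" ++ replace_query ++ ",'" ++ escaped_char ++ "','" ++ replacement_characters ++ "')")
    column_name
  base_query ++ replace_query ++ ";"

-- ===== PORT B =====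
-- "REPLACE(" * n
def pvOpens : Nat → String
  | 0 => ""
  | n + 1 => "REPLACE(" ++ pvOpens n

-- one closing tail per character
def pvTail (replacement_characters : String) (char : String) : String :=
  ",'" ++ PySem.Str.replace char "'" "''" ++ "','" ++ replacement_characters ++ "')"

def generate_sql_replace_query_alt (table_name : String) (column_name : String) (characters_to_remove : List String) (replacement_characters : String) : String :=
  let base_query := "UPDATE " ++ table_name ++ " AS t SET " ++ column_name ++ " = "
  let opens := pvOpens characters_to_remove.length
  let tails := String.join (characters_to_remove.map (pvTail replacement_characters))
  base_query ++ opens ++ column_name ++ tails ++ ";"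

-- ===== PRECONDITION & SPEC =====
def Spec_generate_sql_replace_query (table_name : String) (column_name : String) (characters_to_remove : List String) (replacement_characters : String) (out : String) : Prop := out = generate_sql_replace_query_alt table_name column_name characters_to_remove replacement_characters
instance (table_name : String) (column_name : String) (characters_to_remove : List String) (replacement_characters : String) (out : String) : Decidable (Spec_generate_sql_replace_query table_name column_name characters_to_remove replacement_characters out) := by unfold Spec_generate_sql_replace_query; infer_instance

-- ===== CLAIM (what is proved, stated in full; the proofs are below) =====
def Claim_equal_generate_sql_replace_query : Prop := ∀ (table_name : String) (column_name : String) (characters_to_remove : List String) (replacement_characters : String), Dom_generate_sql_replace_query table_name column_name characters_to_remove replacement_characters → Spec_generate_sql_replace_query table_name column_name characters_to_remove replacement_characters (generate_sql_replace_query table_name column_name characters_to_remove replacement_characters)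

-- ===== LEMMAS AND PROOFS =====


lemma pvOpens_snoc (n : Nat) : pvOpens n ++ "REPLACE(" = pvOpens (n + 1) := by
  induction n with
  | zero => simp [pvOpens]
  | succ k ih => simp only [pvOpens, String.append_assoc, ih]

lemma joinAcc (f : String → String) (a : String) (l : List String) :
    l.foldl (fun x y => x ++ f y) a = a ++ l.foldl (fun x y => x ++ f y) "" := by
  induction l generalizing a with
  | nil => simp
  | cons c cs ih =>
    simp only [List.foldl_cons]
    rw [ih (a ++ f c), ih ("" ++ f c)]
    simp [String.append_assoc]

lemma fold_eq (replacement_characters : String) (cs : List String) (col : String) :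
    cs.foldl
      (fun q char =>
        "REPLACE(" ++ q ++ ",'" ++ PySem.Str.replace char "'" "''" ++ "','" ++ replacement_characters ++ "')")
      col
    = pvOpens cs.length ++ col ++ String.join (cs.map (pvTail replacement_characters)) := by
  induction cs generalizing col with
  | nil => simp [pvOpens, String.join]
  | cons c cs ih =>
    simp only [List.foldl_cons, List.map_cons, List.length_cons, String.join, List.foldl_map] at *
    rw [ih, ← pvOpens_snoc cs.length, joinAcc (pvTail replacement_characters) ("" ++ pvTail replacement_characters c) cs]
    simp [pvTail, String.append_assoc]

-- ===== VERDICT (by name: the statement is the Claim_ definition above) =====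
theorem generate_sql_replace_query_spec : Claim_equal_generate_sql_replace_query := by
  intro t c cs r _
  unfold Spec_generate_sql_replace_query
  simp only [generate_sql_replace_query, generate_sql_replace_query_alt]
  rw [fold_eq]
  simp [String.append_assoc]
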